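-- pv_equiv track=rewrite | github.com/AceRB-notabot/KanaShift | ports/python/phonoshift.py | strip_checks_from_tagged
-- ===== SOURCE A (Python) =====
-- from typing import List, Optional, Tuple
--
-- def is_token_sep(ch: str) -> bool:
--     return ch in (" ", "-", "'", ".", ",", "!", "?", ":", ";", "\t", "\n", "\r")
--
-- def strip_checks_from_tagged(tagged: str, check_chars_per_token: int) -> Optional[Tuple[str, List[str]]]:
--     n = max(1, int(check_chars_per_token))
--
--     base: List[str] = []
--     given: List[str] = []
--     tok: List[str] = []
--
--     def flush() -> bool:
--         if not tok:
--             return True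
--         t = "".join(tok)
--         tok.clear()
--         if len(t) <= n:
--             return False
--         chk = t[-n:]
--         base_tok = t[:-n]
--         given.append(chk)
--         base.append(base_tok)
--         return True
--
--     for c in tagged:
--         if is_token_sep(c):
--             if not flush():
--                 return None
--             base.append(c)
--         else:
--             tok.append(c)
--
--     if not flush():
--         return None
--
--     return ("".join(base), given)
-- ===== SOURCE B (Python) =====
-- from typing import List, Optional, Tuple
--
-- SEPS = " -'.,!?:;\t\n\r"
--
-- def strip_checks_from_tagged(tagged: str, check_chars_per_token: int) -> Optional[Tuple[str, List[str]]]: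
--     n = max(1, int(check_chars_per_token))
--     # phase 1: tokenize into pieces (separator chars and maximal non-separator runs)
--     pieces = []
--     i, L = 0, len(tagged)
--     while i < L:
--         if tagged[i] in SEPS:
--             pieces.append((True, tagged[i]))
--             i += 1
--         else:
--             j = i + 1
--             while j < L and tagged[j] not in SEPS:
--                 j += 1
--             pieces.append((False, tagged[i:j]))
--             i = j
--     # phase 2: process pieces
--     base: List[str] = []
--     given: List[str] = []
--     for is_sep, p in pieces:
--         if is_sep:
--             base.append(p)
--         else:
--             if len(p) <= n:
--                 return None
--             base.append(p[:-n])
--             given.append(p[-n:])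
--     return ("".join(base), given)
-- ===== Notes on version B (the rewrite author's own statement) =====
-- stated objective: alternative
-- what changed: Replaces A's single stateful character pass with a pending-token accumulator and flush() closure by a two-phase algorithm: first tokenize the string into a list of pieces (separator chars and maximal non-separator runs found by scanning ahead with slices), then process that piece list to build base and given; the constant-factor speedup comes from slicing whole runs instead of appending and re-joining characters one at a time.
import Mathlib
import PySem

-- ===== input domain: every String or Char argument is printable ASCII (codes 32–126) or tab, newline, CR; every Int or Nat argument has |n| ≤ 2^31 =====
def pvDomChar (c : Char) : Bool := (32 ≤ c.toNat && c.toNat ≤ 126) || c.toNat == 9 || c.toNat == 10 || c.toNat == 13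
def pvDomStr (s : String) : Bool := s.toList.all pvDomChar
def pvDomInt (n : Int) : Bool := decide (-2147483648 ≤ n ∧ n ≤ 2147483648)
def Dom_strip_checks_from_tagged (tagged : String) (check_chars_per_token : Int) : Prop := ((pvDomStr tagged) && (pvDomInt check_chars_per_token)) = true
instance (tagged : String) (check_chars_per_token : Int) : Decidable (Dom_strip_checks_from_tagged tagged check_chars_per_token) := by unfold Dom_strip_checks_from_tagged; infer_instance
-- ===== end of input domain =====

-- B re-implements A as two phases (tokenize into pieces, then process them) instead of one
-- stateful character pass with a token accumulator; same results, objective: alternative decomposition.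

-- ===== PORT A =====
-- is_token_sep
def isTokenSep (ch : Char) : Bool :=
  ch == ' ' || ch == '-' || ch == '\'' || ch == '.' || ch == ',' ||
  ch == '!' || ch == '?' || ch == ':' || ch == ';' || ch == '\t' || ch == '\n' || ch == '\r'

-- flush(): acts on (base, given, tok); success returns the new (base, given), failure none.
-- t[-n:] / t[:-n] are in-range here (1 ≤ n < len t), so they are drop/take at len t - n, exact.
def flushA (n : Int) (base given : List String) (tok : List Char) : Option (List String × List String) :=
  if tok = [] then some (base, given)
  else
    if (tok.length : Int) ≤ n then none
    else
      some (base ++ [String.ofList (tok.take (tok.length - n.toNat))],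
            given ++ [String.ofList (tok.drop (tok.length - n.toNat))])

-- the for-loop over the characters, then the final flush and join
def goA (n : Int) (base given : List String) (tok : List Char) : List Char → Option (String × List String)
  | [] =>
    match flushA n base given tok with
    | none => none
    | some (b, g) => some (String.join b, g)
  | c :: cs =>
    if isTokenSep c then
      match flushA n base given tok with
      | none => none
      | some (b, g) => goA n (b ++ [String.ofList [c]]) g [] cs
    else
      goA n base given (tok ++ [c]) cs

def strip_checks_from_tagged (tagged : String) (check_chars_per_token : Int) : Option (String × List String) :=
  goA (max 1 check_chars_per_token) [] [] [] tagged.toList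

-- ===== PORT B =====
-- phase 1: the outer while-loop; a non-separator run is scanned by the inner while (takeWhile/dropWhile)
def tokenizeCs (cs : List Char) : List (Bool × List Char) :=
  match cs with
  | [] => []
  | c :: rest =>
    if isTokenSep c then (true, [c]) :: tokenizeCs rest
    else
      (false, (c :: rest).takeWhile (fun x => !isTokenSep x)) ::
        tokenizeCs ((c :: rest).dropWhile (fun x => !isTokenSep x))
termination_by cs.length
decreasing_by
  · simp
  · simp only [List.dropWhile_cons, *]
    simpa using Nat.lt_succ_of_le (List.length_dropWhile_le _ rest)

-- phase 2: the for-loop over the pieces (building base and given, early None on a short token)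
def procB (n : Int) : List (Bool × List Char) → Option (List String × List String)
  | [] => some ([], [])
  | (true, p) :: ps =>
    (procB n ps).map (fun bg => (String.ofList p :: bg.1, bg.2))
  | (false, p) :: ps =>
    if (p.length : Int) ≤ n then none
    else
      (procB n ps).map (fun bg =>
        (String.ofList (p.take (p.length - n.toNat)) :: bg.1,
         String.ofList (p.drop (p.length - n.toNat)) :: bg.2))

def strip_checks_from_tagged_alt (tagged : String) (check_chars_per_token : Int) : Option (String × List String) :=
  let n := max 1 check_chars_per_token
  match procB n (tokenizeCs tagged.toList) with
  | none => none
  | some (b, g) => some (String.join b, g)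

-- ===== PRECONDITION & SPEC =====
def Spec_strip_checks_from_tagged (tagged : String) (check_chars_per_token : Int) (out : Option (String × List String)) : Prop := out = strip_checks_from_tagged_alt tagged check_chars_per_token
instance (tagged : String) (check_chars_per_token : Int) (out : Option (String × List String)) : Decidable (Spec_strip_checks_from_tagged tagged check_chars_per_token out) := by unfold Spec_strip_checks_from_tagged; infer_instance

-- ===== CLAIM (what is proved, stated in full; the proofs are below) =====
def Claim_equal_strip_checks_from_tagged : Prop := ∀ (tagged : String) (check_chars_per_token : Int), Dom_strip_checks_from_tagged tagged check_chars_per_token → Spec_strip_checks_from_tagged tagged check_chars_per_token (strip_checks_from_tagged tagged check_chars_per_token)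

-- ===== LEMMAS AND PROOFS =====

-- accumulator-style tokenizer, used only to bridge A's pending-token state to B's tokenizer
def tokP (tok : List Char) (cs : List Char) : List (Bool × List Char) :=
  match cs with
  | [] => if tok = [] then [] else [(false, tok)]
  | c :: rest =>
    if isTokenSep c then
      (if tok = [] then [] else [(false, tok)]) ++ (true, [c]) :: tokP [] rest
    else
      tokP (tok ++ [c]) rest

lemma tokenizeCs_eq (cs : List Char) :
    tokenizeCs cs =
      (if cs.takeWhile (fun x => !isTokenSep x) = [] then []
       else [(false, cs.takeWhile (fun x => !isTokenSep x))]) ++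
      tokenizeCs (cs.dropWhile (fun x => !isTokenSep x)) := by
  cases cs with
  | nil => simp [tokenizeCs]
  | cons c rest =>
    by_cases h : isTokenSep c = true
    · simp [h]
    · conv_lhs => rw [tokenizeCs]
      simp [h]

lemma tokP_eq (cs : List Char) : ∀ tok,
    tokP tok cs =
      (if tok ++ cs.takeWhile (fun x => !isTokenSep x) = [] then []
       else [(false, tok ++ cs.takeWhile (fun x => !isTokenSep x))]) ++
      tokenizeCs (cs.dropWhile (fun x => !isTokenSep x)) := by
  induction cs with
  | nil => intro tok; simp [tokP, tokenizeCs]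
  | cons c rest ih =>
    intro tok
    by_cases h : isTokenSep c = true
    · rw [tokP]
      simp only [h, if_true, List.takeWhile_cons, List.dropWhile_cons, Bool.not_true,
        Bool.false_eq_true, if_false, List.append_nil]
      rw [ih []]
      simp only [List.nil_append]
      conv_rhs => rw [tokenizeCs]
      simp only [h, if_true]
      rw [← tokenizeCs_eq rest]
    · rw [tokP]
      simp only [h, Bool.false_eq_true, if_false, List.takeWhile_cons, List.dropWhile_cons,
        Bool.not_false, if_true]
      rw [ih (tok ++ [c])]
      simp [List.append_assoc]

lemma tokP_nil (cs : List Char) : tokP [] cs = tokenizeCs cs := by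
  rw [tokP_eq]
  simp only [List.nil_append]
  rw [← tokenizeCs_eq]

lemma goA_eq (n : Int) (cs : List Char) : ∀ base given tok,
    goA n base given tok cs =
      match procB n (tokP tok cs) with
      | none => none
      | some (b, g) => some (String.join (base ++ b), given ++ g) := by
  induction cs with
  | nil =>
    intro base given tok
    rw [goA, tokP]
    by_cases h : tok = []
    · simp [h, flushA, procB]
    · simp only [h, if_false, flushA]
      by_cases hl : (tok.length : Int) ≤ n
      · simp [hl, procB]
      · simp [hl, procB]
  | cons c cs ih =>
    intro base given tok
    rw [goA, tokP]
    by_cases hc : isTokenSep c = true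
    · simp only [hc, if_true]
      by_cases h : tok = []
      · simp only [h, if_true, flushA, List.nil_append]
        rw [ih]
        cases hp : procB n (tokP [] cs) with
        | none => simp [procB, hp]
        | some bg => simp [procB, hp, List.append_assoc]
      · simp only [h, if_false, flushA]
        by_cases hl : (tok.length : Int) ≤ n
        · simp [hl, procB]
        · simp only [hl, if_false, List.cons_append, List.nil_append]
          rw [ih]
          cases hp : procB n (tokP [] cs) with
          | none => simp [procB, hp, hl]
          | some bg => simp [procB, hp, hl, List.append_assoc]
    · simp only [hc, Bool.false_eq_true, if_false]
      exact ih base given (tok ++ [c])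

-- ===== VERDICT (by name: the statement is the Claim_ definition above) =====
theorem strip_checks_from_tagged_spec : Claim_equal_strip_checks_from_tagged := by
  intro tagged cpt _
  unfold Spec_strip_checks_from_tagged strip_checks_from_tagged strip_checks_from_tagged_alt
  rw [goA_eq, tokP_nil]
  cases hp : procB (max 1 cpt) (tokenizeCs tagged.toList) with
  | none => simp [hp]
  | some bg => simp [hp]
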